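-- pv_equiv track=rewrite | github.com/moti-malka/gl2gh | backend/app/utils/transformers/cicd_transformer.py | _convert_if_condition
-- ===== SOURCE A (Python) =====
-- from typing import Any, Dict, List, Optional, Tuple
--
-- def _convert_if_condition(gitlab_if: str) -> Optional[str]:
--     """Convert GitLab CI if condition to GitHub Actions"""
--     # Basic conversion - more complex logic may be needed
--     gh_if = gitlab_if
--
--     # Replace common patterns
--     replacements = {
--         "$CI_COMMIT_BRANCH": "github.ref_name",
--         "$CI_COMMIT_TAG": "github.ref_name",
--         "$CI_MERGE_REQUEST_ID": "github.event.pull_request.number",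
--         "$CI_PIPELINE_SOURCE": "github.event_name",
--         "== 'merge_request_event'": "== 'pull_request'",
--         "== 'push'": "== 'push'",
--     }
--
--     for old, new in replacements.items():
--         gh_if = gh_if.replace(old, new)
--
--     return gh_if
-- ===== SOURCE B (Python) =====
-- def _convert_if_condition(gitlab_if):
--     """Convert GitLab CI if condition to GitHub Actions"""
--     replacements = [
--         ("$CI_COMMIT_BRANCH", "github.ref_name"),
--         ("$CI_COMMIT_TAG", "github.ref_name"),
--         ("$CI_MERGE_REQUEST_ID", "github.event.pull_request.number"),
--         ("$CI_PIPELINE_SOURCE", "github.event_name"),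
--         ("== 'merge_request_event'", "== 'pull_request'"),
--         ("== 'push'", "== 'push'"),
--     ]
--     out = []
--     i = 0
--     n = len(gitlab_if)
--     while i < n:
--         for old, new in replacements:
--             if gitlab_if.startswith(old, i):
--                 out.append(new)
--                 i += len(old)
--                 break
--         else:
--             out.append(gitlab_if[i])
--             i += 1
--     return "".join(out)
-- ===== Notes on version B (the rewrite author's own statement) =====
-- stated objective: alternative
-- what changed: A runs six sequential full-string str.replace passes (one per table entry, each rebuilding the whole string); B makes a single left-to-right scan over the string, substituting the first table pattern that matches at each position, so replaced text is never rescanned and no cascading rewrites are possible.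
import Mathlib
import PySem

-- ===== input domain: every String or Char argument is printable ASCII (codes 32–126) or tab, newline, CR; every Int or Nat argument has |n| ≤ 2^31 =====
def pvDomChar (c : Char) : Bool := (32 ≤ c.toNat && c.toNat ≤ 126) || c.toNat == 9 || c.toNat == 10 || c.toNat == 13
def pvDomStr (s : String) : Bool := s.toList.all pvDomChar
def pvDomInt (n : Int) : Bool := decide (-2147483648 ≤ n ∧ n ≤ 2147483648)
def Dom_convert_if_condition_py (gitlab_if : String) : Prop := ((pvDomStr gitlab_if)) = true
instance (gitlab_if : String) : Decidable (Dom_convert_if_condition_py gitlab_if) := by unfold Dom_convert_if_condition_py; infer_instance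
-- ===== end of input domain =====

-- B replaces A's six sequential full-string `str.replace` passes by ONE left-to-right scan
-- that substitutes the first matching pattern at each position (objective: alternative; same results,
-- no cascading rewrites possible by construction).

-- ===== PORT A =====
-- the `replacements` dict of A, as an association list in insertion order
def pvTableA : List (String × String) :=
  [("$CI_COMMIT_BRANCH", "github.ref_name"),
   ("$CI_COMMIT_TAG", "github.ref_name"),
   ("$CI_MERGE_REQUEST_ID", "github.event.pull_request.number"),
   ("$CI_PIPELINE_SOURCE", "github.event_name"),
   ("== 'merge_request_event'", "== 'pull_request'"),
   ("== 'push'", "== 'push'")]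

-- A: gh_if = gitlab_if; for old, new in replacements.items(): gh_if = gh_if.replace(old, new); return gh_if
def convert_if_condition_py (gitlab_if : String) : Option String :=
  some (pvTableA.foldl (fun gh_if p => PySem.Str.replace gh_if p.1 p.2) gitlab_if)

-- ===== PORT B =====
-- B's `replacements` list (pairs of char lists: B works position-wise on the string)
def pvTableB : List (List Char × List Char) :=
  [("$CI_COMMIT_BRANCH".toList, "github.ref_name".toList),
   ("$CI_COMMIT_TAG".toList, "github.ref_name".toList),
   ("$CI_MERGE_REQUEST_ID".toList, "github.event.pull_request.number".toList),
   ("$CI_PIPELINE_SOURCE".toList, "github.event_name".toList),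
   ("== 'merge_request_event'".toList, "== 'pull_request'".toList),
   ("== 'push'".toList, "== 'push'".toList)]

-- B's `while i < n` loop: the remaining suffix plays the role of gitlab_if[i:], fuel = n - i
-- (fuel only makes the recursion structural; with fuel ≥ length it is exactly B's loop)
def pvScanGo (tb : List (List Char × List Char)) : Nat → List Char → List Char
  | _, [] => []
  | 0, _ => []
  | fuel + 1, c :: t =>
    match tb.find? (fun p => p.1.isPrefixOf (c :: t)) with
    | some (k, v) => v ++ pvScanGo tb fuel (List.drop k.length (c :: t))
    | none => c :: pvScanGo tb fuel t

def convert_if_condition_py_alt (gitlab_if : String) : Option String :=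
  some (String.ofList (pvScanGo pvTableB gitlab_if.toList.length gitlab_if.toList))

-- ===== PRECONDITION & SPEC =====
def Spec_convert_if_condition_py (gitlab_if : String) (out : Option String) : Prop := out = convert_if_condition_py_alt gitlab_if
instance (gitlab_if : String) (out : Option String) : Decidable (Spec_convert_if_condition_py gitlab_if out) := by unfold Spec_convert_if_condition_py; infer_instance

-- ===== CLAIM (what is proved, stated in full; the proofs are below) =====
def Claim_equal_convert_if_condition_py : Prop := ∀ (gitlab_if : String), Dom_convert_if_condition_py gitlab_if → Spec_convert_if_condition_py gitlab_if (convert_if_condition_py gitlab_if)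

-- ===== LEMMAS AND PROOFS =====

-- `pvBlocks k u`: at no start position inside u can an occurrence of k begin
-- (neither k a prefix of a nonempty suffix of u, nor that suffix a prefix of k)
def pvBlocks (k : List Char) : List Char → Bool
  | [] => true
  | c :: u => !(List.isPrefixOf k (c :: u)) && !(List.isPrefixOf (c :: u) k) && pvBlocks k u

-- every key of the table is nonempty
def pvNeOK (tb : List (List Char × List Char)) : Bool := tb.all (fun p => !p.1.isEmpty)

-- no key occurrence can begin inside (or at the start of) another key
def pvKeysOK : List (List Char × List Char) → Bool
  | [] => true
  | p :: rest => rest.all (fun q => pvBlocks q.1 p.1 && pvBlocks p.1 q.1) && pvKeysOK rest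

-- no later key occurrence can begin inside a value already substituted
def pvValsOK : List (List Char × List Char) → Bool
  | [] => true
  | p :: rest => rest.all (fun q => pvBlocks q.1 p.2) && pvValsOK rest

-- no proper nonempty suffix of a key is prefix-comparable with any value
def pvSufsOK (tb : List (List Char × List Char)) : Bool :=
  tb.all (fun p => p.1.tails.all (fun w =>
    (w == p.1) || w.isEmpty ||
      tb.all (fun q => !(List.isPrefixOf w q.2) && !(List.isPrefixOf q.2 w))))

-- w is a proper nonempty suffix of some key of tb
def pvSuf (tb : List (List Char × List Char)) (w : List Char) : Prop :=
  w ≠ [] ∧ ∃ p ∈ tb, w <:+ p.1 ∧ w ≠ p.1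

-- one fold step of A
def pvStep (acc : List Char) (p : List Char × List Char) : List Char :=
  PySem.Chars.replace acc p.1 p.2

-- ---- equations for PySem.Chars.replace (nonempty pattern) ----

theorem pvGoAcc (old new : List Char) :
    ∀ (f : Nat) (l acc : List Char),
      PySem.Chars.replace.go old new f l acc = acc.reverse ++ PySem.Chars.replace.go old new f l [] := by
  intro f
  induction f with
  | zero => intro l acc; simp [PySem.Chars.replace.go]
  | succ f ih =>
    intro l acc
    cases l with
    | nil => simp [PySem.Chars.replace.go]
    | cons c t =>
      simp only [PySem.Chars.replace.go]
      by_cases h : List.isPrefixOf old (c :: t)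
      · simp only [h, if_true]
        rw [ih _ (new.reverse ++ acc), ih _ (new.reverse ++ [])]
        simp
      · simp only [h]
        rw [ih t (c :: acc), ih t [c]]
        simp

theorem pvGoFuel (old new : List Char) (hk : old ≠ []) :
    ∀ (f1 : Nat) (f2 : Nat) (l acc : List Char), l.length ≤ f1 → l.length ≤ f2 →
      PySem.Chars.replace.go old new f1 l acc = PySem.Chars.replace.go old new f2 l acc := by
  intro f1
  induction f1 with
  | zero =>
    intro f2 l acc h1 _
    have : l = [] := List.eq_nil_of_length_eq_zero (Nat.le_zero.mp h1)
    subst this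
    cases f2 <;> simp [PySem.Chars.replace.go]
  | succ f1 ih =>
    intro f2 l acc h1 h2
    cases l with
    | nil => cases f2 <;> simp [PySem.Chars.replace.go]
    | cons c t =>
      cases f2 with
      | zero => simp at h2
      | succ f2 =>
        simp only [PySem.Chars.replace.go]
        by_cases h : List.isPrefixOf old (c :: t)
        · simp only [h, if_true]
          have hol : 1 ≤ old.length := List.length_pos_iff.mpr hk
          have h1' : t.length + 1 ≤ f1 + 1 := by simpa using h1
          have h2' : t.length + 1 ≤ f2 + 1 := by simpa using h2
          apply ih <;> (simp only [List.length_drop, List.length_cons]; omega)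
        · simp only [h]
          have h1' : t.length + 1 ≤ f1 + 1 := by simpa using h1
          have h2' : t.length + 1 ≤ f2 + 1 := by simpa using h2
          apply ih <;> omega

theorem pvReplNil (old new : List Char) (hk : old ≠ []) :
    PySem.Chars.replace [] old new = [] := by
  simp [PySem.Chars.replace, PySem.Chars.replace.go, List.isEmpty_iff, hk]

theorem pvReplSkip (old new t : List Char) (c : Char) (hk : old ≠ [])
    (h : ¬ old <+: (c :: t)) :
    PySem.Chars.replace (c :: t) old new = c :: PySem.Chars.replace t old new := by
  have hb : List.isPrefixOf old (c :: t) = false := by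
    rw [Bool.eq_false_iff]
    intro hc
    exact h (List.isPrefixOf_iff_prefix.mp hc)
  simp only [PySem.Chars.replace, List.isEmpty_iff, hk, if_false, List.length_cons]
  have h1 : PySem.Chars.replace.go old new (t.length + 1) (c :: t) [] =
      PySem.Chars.replace.go old new t.length t [c] := by
    simp [PySem.Chars.replace.go, hb]
  rw [h1, pvGoAcc]
  simp

theorem pvGoMatch (old new t acc : List Char) (c : Char) (f : Nat)
    (h : List.isPrefixOf old (c :: t) = true) :
    PySem.Chars.replace.go old new (f + 1) (c :: t) acc =
      PySem.Chars.replace.go old new f (List.drop old.length (c :: t)) (new.reverse ++ acc) := by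
  simp [PySem.Chars.replace.go, h]

theorem pvReplMatch (old new s : List Char) (hk : old ≠ []) (h : old <+: s) :
    PySem.Chars.replace s old new = new ++ PySem.Chars.replace (s.drop old.length) old new := by
  obtain ⟨t, rfl⟩ := h
  obtain ⟨o, old', rfl⟩ : ∃ o old', old = o :: old' := by
    cases old with
    | nil => exact absurd rfl hk
    | cons a b => exact ⟨a, b, rfl⟩
  have hdrop : List.drop (o :: old').length (o :: old' ++ t) = t := List.drop_left
  have hpre : List.isPrefixOf (o :: old') (o :: old' ++ t) = true :=
    List.isPrefixOf_iff_prefix.mpr (List.prefix_append _ _)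
  have hne : (o :: old' ++ t).length = (old' ++ t).length + 1 := by simp
  simp only [PySem.Chars.replace, List.isEmpty_cons, Bool.false_eq_true, if_false, hdrop, hne]
  simp only [List.cons_append]
  rw [pvGoMatch (o :: old') new (old' ++ t) [] o (old' ++ t).length hpre,
      show List.drop (o :: old').length (o :: (old' ++ t)) = t from hdrop, pvGoAcc,
      pvGoFuel (o :: old') new (by simp) (old' ++ t).length t.length _ _
        (by simp only [List.length_append]; omega) (le_refl _)]
  simp

-- ---- generic facts about prefixes ----

theorem pvPrefixAppend (w v x : List Char) (h : w <+: v ++ x) : w <+: v ∨ v <+: w := by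
  rcases Nat.le_total w.length v.length with hl | hl
  · exact Or.inl (List.prefix_of_prefix_length_le h (List.prefix_append _ _) hl)
  · exact Or.inr (List.prefix_of_prefix_length_le (List.prefix_append _ _) h hl)

theorem pvNotPrefix {a b : List Char} (h : List.isPrefixOf a b = false) : ¬ a <+: b := by
  intro hc
  rw [List.isPrefixOf_iff_prefix.mpr hc] at h
  exact Bool.true_eq_false.mp h

-- ---- a replace pass walks through a blocked segment unchanged ----

theorem pvPassthrough (k v : List Char) (hk : k ≠ []) :
    ∀ (u t : List Char), pvBlocks k u = true →
      PySem.Chars.replace (u ++ t) k v = u ++ PySem.Chars.replace t k v := by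
  intro u
  induction u with
  | nil => intro t _; simp
  | cons c u' ih =>
    intro t hb
    simp only [pvBlocks, Bool.and_eq_true] at hb
    obtain ⟨⟨h1, h2⟩, h3⟩ := hb
    have hnp : ¬ k <+: c :: (u' ++ t) := by
      intro hcon
      rcases pvPrefixAppend k (c :: u') t (by simpa using hcon) with h | h
      · exact pvNotPrefix (Bool.not_eq_true' .. ▸ h1) h
      · exact pvNotPrefix (Bool.not_eq_true' .. ▸ h2) h
    rw [List.cons_append, pvReplSkip _ _ _ _ hk hnp, ih t h3, List.cons_append]

-- ---- no new occurrence can be conjured out of a substituted value ----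

theorem pvSufsBlock {tb : List (List Char × List Char)} {w k v : List Char}
    (hS : pvSufsOK tb = true) (hw : pvSuf tb w) (hkv : (k, v) ∈ tb) :
    ¬ w <+: v ∧ ¬ v <+: w := by
  obtain ⟨hwne, p, hp, hsuf, hne⟩ := hw
  have h1 := List.all_eq_true.mp hS p hp
  have h2 := List.all_eq_true.mp h1 w ((List.mem_tails _ _).mpr hsuf)
  simp only [Bool.or_eq_true, beq_iff_eq, List.isEmpty_iff] at h2
  rcases h2 with ((h | h) | h)
  · exact absurd h hne
  · exact absurd h hwne
  · have h3 := List.all_eq_true.mp h (k, v) hkv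
    simp only [Bool.and_eq_true, Bool.not_eq_true'] at h3
    exact ⟨pvNotPrefix h3.1, pvNotPrefix h3.2⟩

theorem pvSufTail {tb : List (List Char × List Char)} {d : Char} {w' : List Char}
    (hw : pvSuf tb (d :: w')) (hne : w' ≠ []) : pvSuf tb w' := by
  obtain ⟨_, p, hp, hsuf, _⟩ := hw
  refine ⟨hne, p, hp, ?_, ?_⟩
  · exact List.IsSuffix.trans ⟨[d], rfl⟩ hsuf
  · intro hcon
    have := List.IsSuffix.length_le hsuf
    rw [hcon] at *
    simp at this

-- if a proper suffix of a key is a prefix of the output of a replace pass,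
-- it already was a prefix of the input
theorem pvS1 (tb : List (List Char × List Char)) (hS : pvSufsOK tb = true)
    (k v : List Char) (hkv : (k, v) ∈ tb) (hk : k ≠ []) :
    ∀ (n : Nat) (t w : List Char), t.length ≤ n → pvSuf tb w →
      w <+: PySem.Chars.replace t k v → w <+: t := by
  intro n
  induction n with
  | zero =>
    intro t w hle hw hpre
    have ht : t = [] := List.eq_nil_of_length_eq_zero (Nat.le_zero.mp hle)
    subst ht
    rw [pvReplNil _ _ hk] at hpre
    exact absurd (List.prefix_nil.mp hpre) hw.1
  | succ n ih =>
    intro t w hle hw hpre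
    by_cases hm : k <+: t
    · rw [pvReplMatch _ _ _ hk hm] at hpre
      rcases pvPrefixAppend _ _ _ hpre with h | h
      · exact absurd h (pvSufsBlock hS hw hkv).1
      · exact absurd h (pvSufsBlock hS hw hkv).2
    · cases t with
      | nil =>
        rw [pvReplNil _ _ hk] at hpre
        exact absurd (List.prefix_nil.mp hpre) hw.1
      | cons c t' =>
        rw [pvReplSkip _ _ _ _ hk hm] at hpre
        cases w with
        | nil => exact absurd rfl hw.1
        | cons d w' =>
          obtain ⟨hd, hw'⟩ := List.cons_prefix_cons.mp hpre
          subst hd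
          by_cases hwe : w' = []
          · subst hwe
            exact List.cons_prefix_cons.mpr ⟨rfl, List.nil_prefix⟩
          · have := ih t' w' (by simpa using Nat.le_of_succ_le_succ (by simpa using hle))
              (pvSufTail hw hwe) hw'
            exact List.cons_prefix_cons.mpr ⟨rfl, this⟩

theorem pvFoldNil (tb' : List (List Char × List Char)) (h : ∀ p ∈ tb', p.1 ≠ []) :
    List.foldl pvStep [] tb' = [] := by
  induction tb' with
  | nil => rfl
  | cons p rest ih =>
    simp only [List.foldl_cons]
    rw [show pvStep [] p = [] from pvReplNil _ _ (h p (List.mem_cons_self ..)), ih]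
    intro q hq
    exact h q (List.mem_cons_of_mem _ hq)

theorem pvPassFold (u : List Char) (tb' : List (List Char × List Char))
    (hall : ∀ q ∈ tb', pvBlocks q.1 u = true ∧ q.1 ≠ []) :
    ∀ t, List.foldl pvStep (u ++ t) tb' = u ++ List.foldl pvStep t tb' := by
  induction tb' with
  | nil => intro t; simp
  | cons q rest ih =>
    intro t
    have hq := hall q (List.mem_cons_self ..)
    simp only [List.foldl_cons]
    rw [show pvStep (u ++ t) q = u ++ pvStep t q from pvPassthrough q.1 q.2 hq.2 u t hq.1]
    exact ih (fun q' hq' => hall q' (List.mem_cons_of_mem _ hq')) (pvStep t q)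

theorem pvNoHead (tb : List (List Char × List Char)) (hS : pvSufsOK tb = true)
    (hne : ∀ p ∈ tb, p.1 ≠ []) :
    ∀ (tb' : List (List Char × List Char)), (∀ p ∈ tb', p ∈ tb) →
      ∀ (t : List Char) (c : Char), (∀ p ∈ tb, ¬ p.1 <+: (c :: t)) →
        List.foldl pvStep (c :: t) tb' = c :: List.foldl pvStep t tb' := by
  intro tb'
  induction tb' with
  | nil => intro _ t c _; rfl
  | cons q rest ih =>
    intro hsub t c hno
    have hqtb := hsub q (List.mem_cons_self ..)
    have hq1 : ¬ q.1 <+: c :: t := hno q hqtb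
    simp only [List.foldl_cons]
    rw [show pvStep (c :: t) q = c :: pvStep t q from pvReplSkip _ _ _ _ (hne q hqtb) hq1]
    apply ih (fun p hp => hsub p (List.mem_cons_of_mem _ hp)) (pvStep t q) c
    intro p hp hcon
    have hpne := hne p hp
    cases hp1 : p.1 with
    | nil => exact hpne hp1
    | cons d w' =>
      rw [hp1] at hcon
      obtain ⟨hd, hw'⟩ := List.cons_prefix_cons.mp hcon
      subst hd
      by_cases hwe : w' = []
      · subst hwe
        exact hno p hp (hp1 ▸ List.cons_prefix_cons.mpr ⟨rfl, List.nil_prefix⟩)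
      · have hlen : w'.length < p.1.length := by rw [hp1]; simp
        have hsufw : pvSuf tb w' := by
          refine ⟨hwe, p, hp, ?_, ?_⟩
          · rw [hp1]; exact ⟨[d], rfl⟩
          · intro hcon2
            rw [hcon2] at hlen
            exact absurd hlen (lt_irrefl _)
        have := pvS1 tb hS q.1 q.2 (by simpa using hqtb) (hne q hqtb)
          t.length t w' (le_refl _) hsufw hw'
        exact hno p hp (hp1 ▸ List.cons_prefix_cons.mpr ⟨rfl, this⟩)

theorem pvKeysOK_split :
    ∀ (T1 : List (List Char × List Char)) (p : List Char × List Char) T2,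
      pvKeysOK (T1 ++ p :: T2) = true → ∀ q ∈ T1 ++ T2, pvBlocks q.1 p.1 = true := by
  intro T1
  induction T1 with
  | nil =>
    intro p T2 h q hq
    simp only [List.nil_append, pvKeysOK, Bool.and_eq_true] at h
    have h2 := List.all_eq_true.mp h.1 q (by simpa using hq)
    simp only [Bool.and_eq_true] at h2
    exact h2.1
  | cons a T1 ih =>
    intro p T2 h q hq
    simp only [List.cons_append, pvKeysOK, Bool.and_eq_true] at h
    rcases List.mem_cons.mp hq with rfl | hq'
    · have h2 := List.all_eq_true.mp h.1 p (by simp)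
      simp only [Bool.and_eq_true] at h2
      exact h2.2
    · exact ih p T2 h.2 q hq'

theorem pvValsOK_split :
    ∀ (T1 : List (List Char × List Char)) (p : List Char × List Char) T2,
      pvValsOK (T1 ++ p :: T2) = true → ∀ q ∈ T2, pvBlocks q.1 p.2 = true := by
  intro T1
  induction T1 with
  | nil =>
    intro p T2 h q hq
    simp only [List.nil_append, pvValsOK, Bool.and_eq_true] at h
    exact List.all_eq_true.mp h.1 q hq
  | cons a T1 ih =>
    intro p T2 h q hq
    simp only [List.cons_append, pvValsOK, Bool.and_eq_true] at h
    exact ih p T2 h.2 q hq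

-- ---- the single scan: fuel is irrelevant once it covers the length ----

theorem pvScanNil (tb : List (List Char × List Char)) (f : Nat) : pvScanGo tb f [] = [] := by
  cases f <;> rfl

theorem pvScanFuel (tb : List (List Char × List Char)) (hne : ∀ p ∈ tb, p.1 ≠ []) :
    ∀ (f1 f2 : Nat) (l : List Char), l.length ≤ f1 → l.length ≤ f2 →
      pvScanGo tb f1 l = pvScanGo tb f2 l := by
  intro f1
  induction f1 with
  | zero =>
    intro f2 l h1 _
    have : l = [] := List.eq_nil_of_length_eq_zero (Nat.le_zero.mp h1)
    subst this
    rw [pvScanNil, pvScanNil]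
  | succ f1 ih =>
    intro f2 l h1 h2
    cases l with
    | nil => rw [pvScanNil, pvScanNil]
    | cons c t =>
      cases f2 with
      | zero => simp at h2
      | succ f2 =>
        simp only [pvScanGo]
        cases hf : tb.find? (fun p => p.1.isPrefixOf (c :: t)) with
        | none =>
          dsimp only
          rw [ih f2 t (by simpa using h1) (by simpa using h2)]
        | some kv =>
          obtain ⟨k, v⟩ := kv
          have hkmem : (k, v) ∈ tb := List.mem_of_find?_eq_some hf
          have hkne : k ≠ [] := hne _ hkmem
          have hkl : 1 ≤ k.length := List.length_pos_iff.mpr hkne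
          simp only [List.length_cons] at h1 h2
          have hl1 : (List.drop k.length (c :: t)).length ≤ f1 := by
            simp only [List.length_drop, List.length_cons]; omega
          have hl2 : (List.drop k.length (c :: t)).length ≤ f2 := by
            simp only [List.length_drop, List.length_cons]; omega
          dsimp only
          rw [ih f2 _ hl1 hl2]

-- ---- main theorem: the six sequential passes equal the single scan ----

theorem pvMain (tb : List (List Char × List Char)) (hNE : pvNeOK tb = true)
    (hK : pvKeysOK tb = true) (hV : pvValsOK tb = true) (hS : pvSufsOK tb = true) :
    ∀ (n : Nat) (s : List Char), s.length ≤ n →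
      List.foldl pvStep s tb = pvScanGo tb s.length s := by
  have hne : ∀ p ∈ tb, p.1 ≠ [] := by
    intro p hp
    have := List.all_eq_true.mp hNE p hp
    simpa [List.isEmpty_iff] using this
  intro n
  induction n with
  | zero =>
    intro s h
    have : s = [] := List.eq_nil_of_length_eq_zero (Nat.le_zero.mp h)
    subst this
    rw [pvFoldNil tb hne, pvScanNil]
  | succ n ih =>
    intro s hle
    cases s with
    | nil => rw [pvFoldNil tb hne, pvScanNil]
    | cons c t0 =>
      cases hf : tb.find? (fun p => p.1.isPrefixOf (c :: t0)) with
      | none =>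
        have hno : ∀ p ∈ tb, ¬ p.1 <+: (c :: t0) := by
          intro p hp hcon
          have := List.find?_eq_none.mp hf p hp
          exact this (List.isPrefixOf_iff_prefix.mpr hcon)
        rw [pvNoHead tb hS hne tb (fun p hp => hp) t0 c hno,
            ih t0 (by simpa using Nat.le_of_succ_le_succ (by simpa using hle))]
        simp only [List.length_cons, pvScanGo, hf]
      | some kv =>
        obtain ⟨k, v⟩ := kv
        obtain ⟨hpb, T1, T2, htb, hT1⟩ := List.find?_eq_some_iff_append.mp hf
        have hkpre : k <+: c :: t0 := List.isPrefixOf_iff_prefix.mp hpb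
        have hkmem : (k, v) ∈ tb := List.mem_of_find?_eq_some hf
        have hkne : k ≠ [] := hne _ hkmem
        have hkl : 1 ≤ k.length := List.length_pos_iff.mpr hkne
        obtain ⟨t, ht⟩ := hkpre
        have hblocks1 : ∀ q ∈ T1, pvBlocks q.1 k = true ∧ q.1 ≠ [] := by
          intro q hq
          refine ⟨pvKeysOK_split T1 (k, v) T2 (htb ▸ hK) q (List.mem_append_left _ hq), ?_⟩
          exact hne q (htb ▸ List.mem_append_left _ hq)
        have hblocks2 : ∀ q ∈ T2, pvBlocks q.1 v = true ∧ q.1 ≠ [] := by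
          intro q hq
          refine ⟨pvValsOK_split T1 (k, v) T2 (htb ▸ hV) q hq, ?_⟩
          exact hne q (htb ▸ List.mem_append_right _ (List.mem_cons_of_mem _ hq))
        have hAfold : ∀ x : List Char,
            List.foldl pvStep (k ++ x) tb = v ++ List.foldl pvStep x tb := by
          intro x
          rw [htb, List.foldl_append, List.foldl_append, List.foldl_cons, List.foldl_cons]
          rw [pvPassFold k T1 hblocks1 x]
          have hstep : pvStep (k ++ List.foldl pvStep x T1) (k, v) =
              v ++ pvStep (List.foldl pvStep x T1) (k, v) := by
            unfold pvStep
            rw [pvReplMatch _ _ _ hkne (List.prefix_append _ _), List.drop_left]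
          rw [hstep, pvPassFold v T2 hblocks2]
        have hlt : t.length ≤ n := by
          have : k.length + t.length = t0.length + 1 := by
            have := congrArg List.length ht
            simpa using this
          have h2 : t0.length + 1 ≤ n + 1 := by simpa using hle
          omega
        rw [← ht, hAfold t, ih t hlt]
        have hdrop : List.drop k.length (c :: t0) = t := by
          rw [← ht]; exact List.drop_left
        have hscan : pvScanGo tb (k ++ t).length (k ++ t) =
            v ++ pvScanGo tb t.length t := by
          rw [ht]
          simp only [List.length_cons, pvScanGo, hf, hdrop]
          rw [pvScanFuel tb hne t0.length t.length t
            (by have := congrArg List.length ht; simp at this; omega) (le_refl _)]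
        rw [hscan]

-- ---- instantiation at the concrete table ----

theorem pvTableFacts :
    pvNeOK pvTableB = true ∧ pvKeysOK pvTableB = true ∧
      pvValsOK pvTableB = true ∧ pvSufsOK pvTableB = true := by decide

-- ===== VERDICT (by name: the statement is the Claim_ definition above) =====
theorem convert_if_condition_py_spec : Claim_equal_convert_if_condition_py := by
  unfold Claim_equal_convert_if_condition_py
  intro s _
  unfold Spec_convert_if_condition_py convert_if_condition_py convert_if_condition_py_alt
  have hchar : (List.foldl (fun gh_if p => PySem.Str.replace gh_if p.1 p.2) s pvTableA).toList
      = List.foldl pvStep s.toList pvTableB := by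
    simp [pvTableA, pvTableB, pvStep, List.foldl, PySem.Str.replace, String.toList_ofList]
  have hmain := pvMain pvTableB pvTableFacts.1 pvTableFacts.2.1 pvTableFacts.2.2.1
    pvTableFacts.2.2.2 s.toList.length s.toList (le_refl _)
  have : (List.foldl (fun gh_if p => PySem.Str.replace gh_if p.1 p.2) s pvTableA)
      = String.ofList (pvScanGo pvTableB s.toList.length s.toList) := by
    rw [← hmain, ← hchar, String.ofList_toList]
  rw [this]
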